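-- pv_equiv track=rewrite | github.com/KeshiChen/COMP9318-Data-Warehousing-and-Data-Mining | labs/lab2/COMP9318-Lab2/submission.py | cart_product
-- ===== SOURCE A (Python) =====
-- def cart_product(row, cols):
--     dims = row[:-1][1-cols:]
--     dim = len(dims)
--     result = []
--     for i in range(2 ** dim):
--         new_row = list(row)
--         for j in range(dim):
--             gap = 2 ** j
--             if i % (2 * gap) > gap -1:
--                 new_row[len(new_row) - 2 -j] = 'ALL'
--         result.append(new_row)
--     return result
-- ===== SOURCE B (Python) =====
-- import itertools
--
-- def cart_product(row, cols):
--     dims = row[:-1][1-cols:]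
--     dim = len(dims)
--     prefix = row[:len(row) - 1 - dim]
--     suffix = row[len(row) - 1:]
--     return [prefix + list(combo) + suffix
--             for combo in itertools.product(*[(d, 'ALL') for d in dims])]
-- ===== Notes on version B (the rewrite author's own statement) =====
-- stated objective: idiomatic
-- what changed: Replaces the bit-mask counter loop with in-place list mutation by itertools.product over per-dimension (value,'ALL') choice pairs, assembling each row as prefix + combo + suffix by concatenation instead of indexed assignment.
import Mathlib
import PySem

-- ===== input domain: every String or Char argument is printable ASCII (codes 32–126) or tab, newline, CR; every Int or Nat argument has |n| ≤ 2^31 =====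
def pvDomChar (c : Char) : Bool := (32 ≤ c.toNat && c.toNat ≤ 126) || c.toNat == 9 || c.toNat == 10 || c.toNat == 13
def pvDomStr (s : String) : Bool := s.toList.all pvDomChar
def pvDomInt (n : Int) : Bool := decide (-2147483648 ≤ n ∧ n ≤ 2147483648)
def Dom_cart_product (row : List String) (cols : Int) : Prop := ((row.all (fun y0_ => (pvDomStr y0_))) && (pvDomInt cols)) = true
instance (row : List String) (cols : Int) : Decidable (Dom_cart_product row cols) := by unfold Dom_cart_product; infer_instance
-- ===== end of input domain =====

-- B replaces A's bit-mask counter with indexed assignment by a product of per-dimension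
-- (value,'ALL') choices assembled by concatenation (objective: more idiomatic).

-- ===== PORT A =====
def cart_product (row : List String) (cols : Int) : List (List String) :=
  let dims := PySem.List.slice (PySem.List.slice row none (some (-1))) (some (1 - cols)) none
  let dim := dims.length
  -- range(2 ** dim) and range(dim): non-negative bounds, List.range is exact here
  (List.range (2 ^ dim)).foldl (fun result i =>
    let new_row :=
      (List.range dim).foldl (fun new_row j =>
        let gap := 2 ^ j
        if i % (2 * gap) > gap - 1 then
          -- new_row[len(new_row)-2-j] = 'ALL': the index is non-negative and in range here
          -- (j < dim ≤ len(row)-1), so List.set is exact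
          new_row.set (new_row.length - 2 - j) "ALL"
        else new_row) row
    result ++ [new_row]) []

-- ===== PORT B =====
-- itertools.product over lists of strings (first factor varies slowest, as in Python)
def pyProduct (cs : List (List String)) : List (List String) :=
  match cs with
  | [] => [[]]
  | c :: rest => c.flatMap (fun x => (pyProduct rest).map (fun t => x :: t))

def cart_product_alt (row : List String) (cols : Int) : List (List String) :=
  let dims := PySem.List.slice (PySem.List.slice row none (some (-1))) (some (1 - cols)) none
  let dim := dims.length
  let pre := PySem.List.slice row none (some ((row.length : Int) - 1 - (dim : Int)))
  let suf := PySem.List.slice row (some ((row.length : Int) - 1)) none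
  (pyProduct (dims.map (fun d => [d, "ALL"]))).map (fun combo => pre ++ combo ++ suf)

-- ===== PRECONDITION & SPEC =====
def Spec_cart_product (row : List String) (cols : Int) (out : List (List String)) : Prop := out = cart_product_alt row cols
instance (row : List String) (cols : Int) (out : List (List String)) : Decidable (Spec_cart_product row cols out) := by unfold Spec_cart_product; infer_instance

-- ===== CLAIM (what is proved, stated in full; the proofs are below) =====
def Claim_equal_cart_product : Prop := ∀ (row : List String) (cols : Int), Dom_cart_product row cols → Spec_cart_product row cols (cart_product row cols)

-- ===== LEMMAS AND PROOFS =====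

-- A's inner-loop body, as a named step function
def pvStep (i : Nat) (r : List String) (j : Nat) : List String :=
  let gap := 2 ^ j
  if i % (2 * gap) > gap - 1 then r.set (r.length - 2 - j) "ALL" else r

-- the row-middle A's counter i produces over dimension values ds (head = slowest bit)
def pvComb : List String → Nat → List String
  | [], _ => []
  | d :: ds, i => (if i % (2 * 2 ^ ds.length) > 2 ^ ds.length - 1 then "ALL" else d) :: pvComb ds i

theorem pvComb_length (ds : List String) (i : Nat) : (pvComb ds i).length = ds.length := by
  induction ds generalizing i with
  | nil => rfl
  | cons d ds ih => simp [pvComb, ih]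

-- A's inner loop over row = P ++ ds ++ [z] rewrites ds into pvComb ds i
theorem pvLoop_eq (ds : List String) (i : Nat) :
    ∀ (P : List String) (z : String),
      (List.range ds.length).foldl (pvStep i) (P ++ ds ++ [z]) = P ++ pvComb ds i ++ [z] := by
  induction ds with
  | nil => intro P z; simp [pvComb]
  | cons d ds ih =>
    intro P z
    have hsplit : P ++ (d :: ds) ++ [z] = (P ++ [d]) ++ ds ++ [z] := by simp
    rw [List.length_cons, List.range_succ, List.foldl_append, hsplit, ih (P ++ [d]) z]
    simp only [List.foldl_cons, List.foldl_nil, pvStep, pvComb]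
    by_cases h : i % (2 * 2 ^ ds.length) > 2 ^ ds.length - 1
    · simp only [h, if_pos]
      have hlen : ((P ++ [d]) ++ pvComb ds i ++ [z]).length - 2 - ds.length = P.length := by
        simp [pvComb_length]
        omega
      rw [hlen]
      have : (P ++ [d]) ++ pvComb ds i ++ [z] = P ++ ([d] ++ (pvComb ds i ++ [z])) := by simp
      rw [this, List.set_append]
      simp
    · simp [h]

-- pvComb only depends on i modulo 2^|ds|
theorem pvComb_mod (ds : List String) (i j : Nat)
    (h : i % 2 ^ ds.length = j % 2 ^ ds.length) : pvComb ds i = pvComb ds j := by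
  induction ds generalizing i j with
  | nil => rfl
  | cons d ds ih =>
    have hd : 2 ^ ds.length ∣ 2 ^ (ds.length + 1) := pow_dvd_pow 2 (Nat.le_succ _)
    have htail : i % 2 ^ ds.length = j % 2 ^ ds.length := by
      rw [← Nat.mod_mod_of_dvd i hd, ← Nat.mod_mod_of_dvd j hd]
      simpa using congrArg (· % 2 ^ ds.length) h
    have hhead : i % (2 * 2 ^ ds.length) = j % (2 * 2 ^ ds.length) := by
      have : 2 * 2 ^ ds.length = 2 ^ (ds.length + 1) := by ring
      rw [this]; simpa using h
    simp [pvComb, hhead, ih _ _ htail]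

-- enumerating A's counter yields exactly B's product
theorem pvMap_comb_eq_product (ds : List String) :
    (List.range (2 ^ ds.length)).map (pvComb ds) = pyProduct (ds.map (fun d => [d, "ALL"])) := by
  induction ds with
  | nil => simp [pyProduct, pvComb]
  | cons d ds ih =>
    have hrange : List.range (2 ^ (ds.length + 1)) =
        List.range (2 ^ ds.length) ++ (List.range (2 ^ ds.length)).map (fun x => 2 ^ ds.length + x) := by
      rw [← List.range_add]; congr 1; ring
    simp only [List.length_cons, hrange, List.map_append, List.map_map]
    have hlow : (List.range (2 ^ ds.length)).map (pvComb (d :: ds)) =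
        ((List.range (2 ^ ds.length)).map (pvComb ds)).map (fun t => d :: t) := by
      rw [List.map_map]
      refine List.map_congr_left (fun i hi => ?_)
      have hi' : i < 2 ^ ds.length := List.mem_range.mp hi
      have hcond : ¬ (i % (2 * 2 ^ ds.length) > 2 ^ ds.length - 1) := by
        have : i % (2 * 2 ^ ds.length) = i := Nat.mod_eq_of_lt (by nlinarith [Nat.one_le_two_pow (n := ds.length)])
        omega
      simp [pvComb, hcond]
    have hhigh : (List.range (2 ^ ds.length)).map (pvComb (d :: ds) ∘ fun x => 2 ^ ds.length + x) =
        ((List.range (2 ^ ds.length)).map (pvComb ds)).map (fun t => "ALL" :: t) := by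
      rw [List.map_map]
      refine List.map_congr_left (fun i hi => ?_)
      have hi' : i < 2 ^ ds.length := List.mem_range.mp hi
      have hpos : 1 ≤ 2 ^ ds.length := Nat.one_le_two_pow
      have hcond : (2 ^ ds.length + i) % (2 * 2 ^ ds.length) > 2 ^ ds.length - 1 := by
        have : (2 ^ ds.length + i) % (2 * 2 ^ ds.length) = 2 ^ ds.length + i :=
          Nat.mod_eq_of_lt (by omega)
        omega
      have htail : pvComb ds (2 ^ ds.length + i) = pvComb ds i := by
        apply pvComb_mod
        simp [Nat.add_mod_left]
      simp [pvComb, hcond, htail]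
    rw [hlow, hhigh, ih]
    simp [pyProduct]

theorem cart_product_spec : Claim_equal_cart_product := by
  intro row cols _
  unfold Spec_cart_product cart_product cart_product_alt
  simp only [PySem.List.slice_to_neg_one, PySem.List.slice_some_none]
  set t := PySem.List.clampIdx row.dropLast.length (1 - cols) with ht
  have htle : t ≤ row.dropLast.length := PySem.List.clampIdx_le _ _
  set dims := row.dropLast.drop t with hdims
  have hdimslen : dims.length = row.dropLast.length - t := by simp [hdims]
  cases hrow : row.eq_nil_or_concat' with
  | inl hnil =>
    subst hnil
    simp [hdims, pyProduct, PySem.List.slice, PySem.List.clampIdx]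
  | inr hcons =>
    obtain ⟨D', z, hDz⟩ := hcons
    have hdl : row.dropLast = D' := by rw [hDz]; simp
    have hlen : row.length = D'.length + 1 := by rw [hDz]; simp
    have htD : t ≤ D'.length := by rw [← hdl]; exact htle
    have hrowsplit : row = D'.take t ++ dims ++ [z] := by
      rw [hdims, hdl]
      conv_lhs => rw [hDz, ← List.take_append_drop t D']
    -- A: the inner loop rewrites the dims segment of the row into pvComb dims i
    have hinner : ∀ i, (List.range dims.length).foldl
        (fun new_row j => if i % (2 * 2 ^ j) > 2 ^ j - 1 then new_row.set (new_row.length - 2 - j) "ALL" else new_row) row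
        = D'.take t ++ pvComb dims i ++ [z] := by
      intro i
      rw [show row = D'.take t ++ dims ++ [z] from hrowsplit]
      exact pvLoop_eq dims i (D'.take t) z
    simp only [hinner]
    rw [PySem.List.foldl_append_singleton_eq_map
      (fun i => D'.take t ++ pvComb dims i ++ [z]) (List.range (2 ^ dims.length)) []]
    -- B: pre and suf
    have hpre : PySem.List.slice row none (some ((row.length : Int) - 1 - (dims.length : Int)))
        = D'.take t := by
      have hval : (row.length : Int) - 1 - (dims.length : Int) = (t : Int) := by
        rw [hlen, hdimslen, hdl]
        push_cast [Nat.cast_sub htD]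
        ring
      rw [hval, PySem.List.slice_to row (by positivity)]
      rw [hrowsplit]
      simp only [Int.toNat_natCast]
      rw [List.take_append_of_le_length (by simp [List.length_take]; omega),
        List.take_append_of_le_length (by simp [List.length_take]; omega), List.take_take]
      simp
    have hsuf : List.drop (PySem.List.clampIdx row.length ((row.length : Int) - 1)) row = [z] := by
      have hval : (row.length : Int) - 1 = ((D'.length : Nat) : Int) := by rw [hlen]; push_cast; ring
      rw [hval, PySem.List.clampIdx_natCast]
      have : min D'.length row.length = D'.length := by omega
      rw [this, hDz, List.drop_left]
    rw [hpre, hsuf, ← pvMap_comb_eq_product, List.map_map]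
    rfl
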